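-- pv_equiv track=rewrite | github.com/jeff-suliga/jeff-suliga.github.io | Puzzles/Ideas/test_words.py | compute
-- ===== SOURCE A (Python) =====
-- ALPHA = [*'answer']
--
-- def compute(word: str):
--     length = len(word)
--     if length < 5 or length > 9:
--         return False
--
--     letters = []
--     for letter in word:
--         if letter in letters:
--             return False
--         elif letter not in ALPHA:
--             return False
--         letters.append(letter)
--
--     return True
-- ===== SOURCE B (Python) =====
-- def compute(word: str):
--     if len(word) < 5 or len(word) > 9:
--         return False
--     counts = [sum(1 for x in word if x == c) for c in 'answer']
--     return all(n <= 1 for n in counts) and sum(counts) == len(word)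
-- ===== Notes on version B (the rewrite author's own statement) =====
-- stated objective: alternative
-- what changed: Instead of scanning the word with a seen-letters accumulator and two early-return branches, B builds a histogram over the fixed six-letter allowed alphabet (one count per allowed letter) and decides validity arithmetically: all counts <= 1 (no duplicates) and the counts summing to the word's length (every letter allowed).
import Mathlib
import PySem

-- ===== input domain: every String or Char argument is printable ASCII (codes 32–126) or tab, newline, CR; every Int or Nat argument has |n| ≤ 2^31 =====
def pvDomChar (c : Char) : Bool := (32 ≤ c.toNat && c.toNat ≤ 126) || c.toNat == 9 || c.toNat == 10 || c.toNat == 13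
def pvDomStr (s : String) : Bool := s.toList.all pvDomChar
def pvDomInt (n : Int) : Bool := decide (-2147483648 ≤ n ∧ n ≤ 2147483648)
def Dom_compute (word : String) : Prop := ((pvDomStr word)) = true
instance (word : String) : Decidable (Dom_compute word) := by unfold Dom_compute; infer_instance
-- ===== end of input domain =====

-- B replaces A's word scan with its seen-letters accumulator and early returns by a
-- histogram over the fixed alphabet 'answer', deciding validity arithmetically.

-- ===== PORT A =====
def ALPHA : List Char := "answer".toList

-- the 'for letter in word' loop with its accumulator 'letters'
def computeLoop : List Char → List Char → Bool
  | [], _ => true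
  | letter :: rest, letters =>
    if letters.contains letter then false
    else if !(ALPHA.contains letter) then false
    else computeLoop rest (letters ++ [letter])

def compute (word : String) : Bool :=
  let length : Int := PySem.Str.len word
  if length < 5 || length > 9 then false
  else computeLoop word.toList []

-- ===== PORT B =====
def compute_alt (word : String) : Bool :=
  if PySem.Str.len word < 5 || PySem.Str.len word > 9 then false
  else
    -- counts = [sum(1 for x in word if x == c) for c in 'answer']
    let counts : List Int :=
      "answer".toList.map
        (fun c => word.toList.foldl (fun acc x => if x == c then acc + 1 else acc) 0)
    -- all(n <= 1 for n in counts) and sum(counts) == len(word)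
    counts.all (fun n => n ≤ 1) && (counts.sum == PySem.Str.len word)

-- ===== PRECONDITION & SPEC =====
def Spec_compute (word : String) (out : Bool) : Prop := out = compute_alt word
instance (word : String) (out : Bool) : Decidable (Spec_compute word out) := by unfold Spec_compute; infer_instance

-- ===== CLAIM (what is proved, stated in full; the proofs are below) =====
def Claim_equal_compute : Prop := ∀ (word : String), Dom_compute word → Spec_compute word (compute word)

-- ===== LEMMAS AND PROOFS =====

-- A's loop characterised: with a duplicate-free accumulator it succeeds iff extending the
-- accumulator by the remaining letters keeps it duplicate-free and all of them lie in ALPHA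
theorem computeLoop_eq (cs : List Char) : ∀ (letters : List Char), letters.Nodup →
    computeLoop cs letters
      = (decide ((letters ++ cs).Nodup) && cs.all (fun c => ALPHA.contains c)) := by
  induction cs with
  | nil => intro letters hl; simp [computeLoop, hl]
  | cons c rest ih =>
    intro letters hl
    simp only [computeLoop]
    by_cases hc : c ∈ letters
    · have hnd : ¬ (letters ++ c :: rest).Nodup := by
        intro hn
        obtain ⟨-, -, hd⟩ := List.nodup_append.1 hn
        exact hd c hc c (by simp) rfl
      simp [hc, hnd]
    · by_cases ha : c ∈ ALPHA
      · have hcb : letters.contains c = false := by simpa using hc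
        have hnew : (letters ++ [c]).Nodup := by
          simp only [List.nodup_append, hl, List.nodup_cons, List.not_mem_nil,
            not_false_iff, List.nodup_nil, and_self, true_and]
          exact fun a hal b hbl => by
            simp only [List.mem_singleton] at hbl
            exact fun he => hc (by rw [hbl] at he; rw [he] at hal; exact hal)
        simp only [hcb, Bool.false_eq_true, if_false, List.contains_eq_mem, ha,
          decide_true, Bool.not_true]
        rw [ih (letters ++ [c]) hnew]
        have hap : letters ++ c :: rest = (letters ++ [c]) ++ rest := by simp
        rw [hap]
        simp [ha, List.all_cons]
      · have hb : decide (c ∈ ALPHA) = false := by simpa using ha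
        simp [hb, hc, List.all_cons]

-- cast of a Nat-valued map-sum to Int
theorem sum_map_cast (f : Char → Nat) (A : List Char) :
    (A.map (fun c => (f c : Int))).sum = ((A.map f).sum : Int) := by
  induction A with
  | nil => simp
  | cons a A ih => simp [ih]

-- a 0/1-indicator sum over a list counts the occurrences of x in it
theorem sum_indicator (x : Char) (A : List Char) :
    (A.map (fun c => if x = c then 1 else 0)).sum = A.count x := by
  induction A with
  | nil => simp
  | cons a A ihA =>
    simp only [List.map_cons, List.sum_cons, List.count_cons, ihA]
    by_cases h : x = a
    · simp [h]; omega
    · have h' : ¬ a = x := fun he => h he.symm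
      simp [h, h']

-- summing the alphabet's histogram counts exactly the word-letters that lie in the alphabet
theorem sum_counts_eq (A : List Char) (hA : A.Nodup) (l : List Char) :
    (A.map (fun c => l.count c)).sum = (l.filter (fun x => A.contains x)).length := by
  induction l with
  | nil => simp
  | cons x l ih =>
    have hstep : (A.map (fun c => (x :: l).count c)).sum
        = (A.map (fun c => l.count c)).sum + A.count x := by
      have : (A.map (fun c => (x :: l).count c))
          = A.map (fun c => l.count c + if x = c then 1 else 0) := by
        apply List.map_congr_left
        intro c _
        rcases eq_or_ne x c with h | h
        · subst h; simp
        · simp [h]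
      rw [this, List.sum_map_add, sum_indicator]
    rw [hstep, ih, List.Nodup.count hA]
    by_cases hx : x ∈ A
    · simp [hx]
    · simp [hx]

-- B's two arithmetic tests together are exactly 'no duplicates and every letter allowed'
theorem hist_iff (l : List Char) :
    ((∀ c ∈ ALPHA, l.count c ≤ 1) ∧ (ALPHA.map (fun c => l.count c)).sum = l.length)
      ↔ (l.Nodup ∧ ∀ x ∈ l, x ∈ ALPHA) := by
  have hA : ALPHA.Nodup := by decide
  rw [sum_counts_eq ALPHA hA l]
  constructor
  · rintro ⟨hle, hsum⟩
    have hall : ∀ x ∈ l, ALPHA.contains x = true := List.length_filter_eq_length_iff.mp hsum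
    have hmem : ∀ x ∈ l, x ∈ ALPHA := fun x hx => by simpa using hall x hx
    refine ⟨List.nodup_iff_count_le_one.mpr ?_, hmem⟩
    intro a
    by_cases ha : a ∈ l
    · exact hle a (hmem a ha)
    · simp [List.count_eq_zero_of_not_mem ha]
  · rintro ⟨hnd, hmem⟩
    refine ⟨fun c _ => List.nodup_iff_count_le_one.mp hnd c, ?_⟩
    have : l.filter (fun x => ALPHA.contains x) = l :=
      List.filter_eq_self.mpr (fun x hx => by simpa using hmem x hx)
    rw [this]

theorem compute_eq_alt (word : String) : compute word = compute_alt word := by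
  simp only [compute, compute_alt]
  by_cases hlen : (PySem.Str.len word < 5 || PySem.Str.len word > 9) = true
  · rw [if_pos hlen, if_pos hlen]
  · rw [if_neg (by simpa using hlen), if_neg (by simpa using hlen)]
    set l := word.toList with hl
    -- rewrite each fold to the letter's count
    have hmap : "answer".toList.map
        (fun c => l.foldl (fun acc x => if x == c then acc + 1 else acc) (0 : Int))
        = ALPHA.map (fun c => (l.count c : Int)) := by
      apply List.map_congr_left
      intro c _
      rw [PySem.List.foldl_beq_add_one]
      simp
    rw [hmap]
    rw [computeLoop_eq l [] (by simp)]
    simp only [List.nil_append]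
    have hsum : (ALPHA.map (fun c => (l.count c : Int))).sum
        = ((ALPHA.map (fun c => l.count c)).sum : Int) :=
      sum_map_cast (fun c => l.count c) ALPHA
    have hlen' : PySem.Str.len word = (l.length : Int) := by
      simp [PySem.Str.len_eq, hl]
    rw [Bool.eq_iff_iff]
    constructor
    · intro hL
      simp only [Bool.and_eq_true, decide_eq_true_eq, List.all_eq_true] at hL
      have hmem : ∀ x ∈ l, x ∈ ALPHA := fun x hx => by simpa using hL.2 x hx
      have hh := (hist_iff l).mpr ⟨hL.1, hmem⟩
      rw [Bool.and_eq_true]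
      constructor
      · rw [List.all_map, List.all_eq_true]
        intro c hc
        simp only [Function.comp, decide_eq_true_eq]
        exact_mod_cast hh.1 c hc
      · rw [hsum, hlen', hh.2]
        simp
    · intro hR
      rw [Bool.and_eq_true] at hR
      have hle : ∀ c ∈ ALPHA, l.count c ≤ 1 := by
        intro c hc
        have := (List.all_eq_true.mp ((List.all_map).symm ▸ hR.1)) c hc
        simp only [Function.comp, decide_eq_true_eq] at this
        exact_mod_cast this
      have hs : (ALPHA.map (fun c => l.count c)).sum = l.length := by
        have := hR.2
        rw [hsum, hlen'] at this
        exact_mod_cast beq_iff_eq.mp this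
      have hh := (hist_iff l).mp ⟨hle, hs⟩
      simp only [Bool.and_eq_true, decide_eq_true_eq, List.all_eq_true]
      exact ⟨hh.1, fun x hx => by simpa using hh.2 x hx⟩

-- ===== VERDICT (by name: the statement is the Claim_ definition above) =====
theorem compute_spec : Claim_equal_compute := by
  intro word _
  unfold Spec_compute
  exact compute_eq_alt word
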